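-- pv_equiv track=rewrite | github.com/angrun/ajapaik-web | ajapaik/ajapaik/utils.py | get_pagination_parameters
-- ===== SOURCE A (Python) =====
-- from math import ceil
--
-- def get_pagination_parameters(page, page_size, photo_count):
--     start = (page - 1) * page_size
--     total = photo_count
--     if start < 0:
--         start = 0
--     if start > total:
--         start = total
--     if int(start + page_size) > total:
--         end = total
--     else:
--         end = start + page_size
--     end = int(end)
--     max_page = ceil(float(total) / float(page_size))
--
--     if page > max_page:
--         start, end, total, max_page, page = get_pagination_parameters(max_page, page_size, photo_count)
--
--     return start, end, total, max_page, page
-- ===== SOURCE B (Python) =====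
-- from math import ceil
--
-- def get_pagination_parameters(page, page_size, photo_count):
--     # Direct (non-recursive) form: clamp the page down to max_page first,
--     # then compute start/end once with the same arithmetic.
--     max_page = ceil(float(photo_count) / float(page_size))
--     effective_page = page if page <= max_page else max_page
--     start = (effective_page - 1) * page_size
--     if start < 0:
--         start = 0
--     if start > photo_count:
--         start = photo_count
--     end = start + page_size
--     if int(end) > photo_count:
--         end = photo_count
--     end = int(end)
--     return start, end, photo_count, max_page, effective_page
-- ===== Notes on version B (the rewrite author's own statement) =====
-- stated objective: simpler
-- what changed: Replaces A's tail-recursive retry (re-running the whole body after clamping page to max_page) by computing max_page first, clamping the page once, and computing start/end directly in a single straight-line pass.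
import Mathlib
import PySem

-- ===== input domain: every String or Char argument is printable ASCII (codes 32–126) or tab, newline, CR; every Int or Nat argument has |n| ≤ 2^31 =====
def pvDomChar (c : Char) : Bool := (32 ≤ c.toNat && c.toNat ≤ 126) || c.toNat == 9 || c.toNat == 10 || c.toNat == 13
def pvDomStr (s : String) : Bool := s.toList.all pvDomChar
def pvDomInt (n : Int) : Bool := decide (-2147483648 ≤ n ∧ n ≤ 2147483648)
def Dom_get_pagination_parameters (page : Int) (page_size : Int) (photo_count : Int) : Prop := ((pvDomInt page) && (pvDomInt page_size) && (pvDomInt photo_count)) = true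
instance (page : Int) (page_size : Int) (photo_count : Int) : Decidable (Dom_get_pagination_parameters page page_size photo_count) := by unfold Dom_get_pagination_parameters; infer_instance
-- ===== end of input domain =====

-- B replaces A's tail-recursive retry by clamping page to max_page once and computing start/end directly (simpler decomposition).
-- Both ports render Python's `ceil(float(total) / float(page_size))` as the exact ceiling division
-- -((-total) // page_size): for |total|, |page_size| ≤ 2^31 (the stated Dom) the double-precision
-- quotient rounds to the exact ceiling, so this is exact on the whole claimed domain.

-- ===== PORT A =====
def get_pagination_parameters (page : Int) (page_size : Int) (photo_count : Int) : Int × Int × Int × Int × Int :=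
  let start0 := (page - 1) * page_size
  let total := photo_count
  let start1 := if start0 < 0 then 0 else start0
  let start2 := if start1 > total then total else start1
  let end_ := if start2 + page_size > total then total else start2 + page_size
  let max_page := -(PySem.Int.floordiv (-total) page_size)  -- ceil(float(total)/float(page_size)), exact on Dom
  if page > max_page then get_pagination_parameters max_page page_size photo_count
  else (start2, end_, total, max_page, page)
termination_by (page - (-(PySem.Int.floordiv (-photo_count) page_size))).toNat
decreasing_by
  rename_i h
  have h' : -(PySem.Int.floordiv (-photo_count) page_size) < page := h
  omega

-- ===== PORT B =====
def get_pagination_parameters_alt (page : Int) (page_size : Int) (photo_count : Int) : Int × Int × Int × Int × Int :=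
  let max_page := -(PySem.Int.floordiv (-photo_count) page_size)  -- ceil(float(photo_count)/float(page_size)), exact on Dom
  let effective_page := if page ≤ max_page then page else max_page
  let start0 := (effective_page - 1) * page_size
  let start1 := if start0 < 0 then 0 else start0
  let start2 := if start1 > photo_count then photo_count else start1
  let end_ := if start2 + page_size > photo_count then photo_count else start2 + page_size
  (start2, end_, photo_count, max_page, effective_page)

-- ===== PRECONDITION & SPEC =====
-- Python A raises ZeroDivisionError when page_size = 0; everything else returns normally.
def Pre_get_pagination_parameters (page : Int) (page_size : Int) (photo_count : Int) : Prop := page_size ≠ 0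
instance (page : Int) (page_size : Int) (photo_count : Int) : Decidable (Pre_get_pagination_parameters page page_size photo_count) := by unfold Pre_get_pagination_parameters; infer_instance
def pvWitness_get_pagination_parameters : Int × Int × Int := (3, 10, 25)
def Spec_get_pagination_parameters (page : Int) (page_size : Int) (photo_count : Int) (out : Int × Int × Int × Int × Int) : Prop := out = get_pagination_parameters_alt page page_size photo_count
instance (page : Int) (page_size : Int) (photo_count : Int) (out : Int × Int × Int × Int × Int) : Decidable (Spec_get_pagination_parameters page page_size photo_count out) := by unfold Spec_get_pagination_parameters; infer_instance

-- ===== CLAIM (what is proved, stated in full; the proofs are below) =====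
def Claim_equal_get_pagination_parameters : Prop := ∀ (page : Int) (page_size : Int) (photo_count : Int), Dom_get_pagination_parameters page page_size photo_count → Pre_get_pagination_parameters page page_size photo_count → Spec_get_pagination_parameters page page_size photo_count (get_pagination_parameters page page_size photo_count)

-- ===== LEMMAS AND PROOFS =====
theorem gpp_unfold (page page_size photo_count : Int) :
    get_pagination_parameters page page_size photo_count =
    (let start0 := (page - 1) * page_size
     let total := photo_count
     let start1 := if start0 < 0 then 0 else start0
     let start2 := if start1 > total then total else start1
     let end_ := if start2 + page_size > total then total else start2 + page_size
     let max_page := -(PySem.Int.floordiv (-total) page_size)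
     if page > max_page then get_pagination_parameters max_page page_size photo_count
     else (start2, end_, total, max_page, page)) := by
  rw [get_pagination_parameters]

-- ===== VERDICT (by name: the statement is the Claim_ definition above) =====
theorem get_pagination_parameters_spec : Claim_equal_get_pagination_parameters := by
  intro page ps pc _ _
  unfold Spec_get_pagination_parameters get_pagination_parameters_alt
  rw [gpp_unfold]
  simp only []
  by_cases h : page > -(PySem.Int.floordiv (-pc) ps)
  · rw [if_pos h, gpp_unfold]
    simp only [lt_irrefl, if_false]
    split_ifs <;> simp only [Prod.mk.injEq] <;> omega
  · rw [if_neg h]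
    split_ifs <;> simp only [Prod.mk.injEq] <;> omega
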